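-- pv_equiv track=rewrite | github.com/kimsun1028/PythonPractice | ExternalSorting.py | ExtSort
-- ===== SOURCE A (Python) =====
-- def merge(list1,list2):
--     result = []
--     i, j = 0, 0
--
--     while i < len(list1) and j < len(list2):
--         if list1[i] < list2[j]:
--             result.append(list1[i])
--             i += 1
--         else:
--             result.append(list2[j])
--             j += 1
--
--
--     result += list1[i:]
--     result += list2[j:]
--     return result
--
-- def merge_2d(arr2d):
--
--     result = arr2d[0]
--     for i in range(1, len(arr2d)):
--         result = merge(result, arr2d[i])
--     return result
--
-- def ExtSort(array,N,M,p):
--     # array를 크기 M의 run들로 정렬하여 runs에 저장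
--     runs = [sorted(array[i:i+M]) for i in range(0,N,M)]
--
--     # R = run의 개수
--     R = len(runs)
--
--     # 병합 개수 K
--     K = 0
--
--     # 최대 p개의 run들을 병합 정렬해 새 run 한개로 만들기
--     while len(runs) > 1:
--         K+=1
--         new_runs = []
--         for i in range(0, len(runs), p):
--             sortedarray = merge_2d(runs[i:i+p])
--             new_runs.append(sortedarray)
--         runs = new_runs
--     sortedresult = runs[0]
--     T = K+1
--     return R, K, T, sortedresult
-- ===== SOURCE B (Python) =====
-- def ExtSort(array, N, M, p):
--     # Closed-form bookkeeping instead of materialising and merging runs: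
--     # the run starts are range(0, N, M), the runs cover array[:starts[-1] + M],
--     # the pass count is iterated ceiling division, and merging sorted runs of
--     # ints yields exactly the sorted covered prefix -- so sort once.
--     starts = range(0, N, M)
--     R = len(starts)
--     covered = starts[-1] + M  # IndexError when there are no runs (as A's runs[0])
--     K = 0
--     r = R
--     while r > 1:
--         K += 1
--         r = (r + p - 1) // p
--     return R, K, K + 1, sorted(array[:covered])
-- ===== Notes on version B (the rewrite author's own statement) =====
-- stated objective: simpler
-- what changed: B replaces the run-building and the multi-pass chained two-way merging by closed-form arithmetic (run count and pass count are ceiling divisions) plus a single sort of the prefix the runs cover.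
-- outside the precondition, e.g. on ExtSort([27, 27, 0, 0], -42, -3, 5): A returns (14, 2, 3, [27]), B returns (14, 2, 3, [])
import Mathlib
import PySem

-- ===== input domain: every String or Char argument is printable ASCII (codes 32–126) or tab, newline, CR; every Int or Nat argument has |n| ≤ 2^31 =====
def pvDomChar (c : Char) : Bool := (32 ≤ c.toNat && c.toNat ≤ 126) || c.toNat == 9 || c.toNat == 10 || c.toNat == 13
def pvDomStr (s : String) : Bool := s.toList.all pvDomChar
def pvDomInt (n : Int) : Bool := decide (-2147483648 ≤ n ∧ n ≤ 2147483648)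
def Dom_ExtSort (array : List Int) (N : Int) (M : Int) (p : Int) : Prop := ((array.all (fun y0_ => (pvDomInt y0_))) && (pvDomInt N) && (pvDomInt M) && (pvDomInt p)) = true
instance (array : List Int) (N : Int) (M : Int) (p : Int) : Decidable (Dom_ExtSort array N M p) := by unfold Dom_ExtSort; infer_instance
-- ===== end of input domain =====

-- B replaces A's run-building and multi-pass chained two-way merging by closed-form
-- ceiling-division arithmetic for the run/pass counts plus a single sort of the prefix
-- the runs cover (objective: simpler).

-- ===== PORT A =====

-- merge(list1, list2): the while loop over indices i, j with the leftover tails appended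
-- is ported as the obvious recursion over the two lists (same comparisons, same order).
def pvMerge : List Int → List Int → List Int
  | [], l2 => l2
  | l1, [] => l1
  | a :: l1, b :: l2 =>
      if a < b then a :: pvMerge l1 (b :: l2) else b :: pvMerge (a :: l1) l2
termination_by l1 l2 => l1.length + l2.length
decreasing_by all_goals (simp; try omega)

-- merge_2d(arr2d): result = arr2d[0], then fold merge over the rest.
-- arr2d = [] makes Python raise IndexError; inside Pre_ExtSort every call is nonempty.
def pvMerge2d (arr2d : List (List Int)) : List Int :=
  match arr2d with
  | [] => []
  | r :: rest => rest.foldl pvMerge r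

-- one pass of the while loop: for i in range(0, len(runs), p): new_runs.append(merge_2d(runs[i:i+p]))
def pvPass (runs : List (List Int)) (p : Int) : List (List Int) :=
  (PySem.List.pyRange 0 runs.length p).map
    (fun i => pvMerge2d (PySem.List.slice runs (some i) (some (i + p))))

-- the while loop; fuel = initial number of runs (enough whenever Python terminates,
-- i.e. on Pre_ExtSort); runs.headD [] stands for runs[0] (Python raises on []; off Pre_).
def pvLoopA : Nat → List (List Int) → Int → Int → Int × List Int
  | 0, runs, _, K => (K, runs.headD [])
  | fuel + 1, runs, p, K =>
      if 1 < runs.length then pvLoopA fuel (pvPass runs p) p (K + 1) else (K, runs.headD [])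

-- ===== PORT B =====

-- while r > 1: K += 1; r = (r + p - 1) // p   (fuel = R, enough on Pre_ExtSort)
def pvLoopB : Nat → Int → Int → Int → Int
  | 0, _, _, K => K
  | fuel + 1, r, p, K =>
      if 1 < r then pvLoopB fuel (PySem.Int.floordiv (r + p - 1) p) p (K + 1) else K

def ExtSort (array : List Int) (N : Int) (M : Int) (p : Int) : Int × Int × Int × List Int :=
  let runs := (PySem.List.pyRange 0 N M).map
    (fun i => PySem.List.sorted (PySem.List.slice array (some i) (some (i + M))) (fun x => x))
  let R : Int := runs.length
  let KS := pvLoopA runs.length runs p 0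
  (R, KS.1, KS.1 + 1, KS.2)

-- starts[-1] ported as (pyGet? starts (-1)).getD 0: Python raises IndexError on an
-- empty range there (outside Pre_ExtSort); the default is never reached inside Pre_.
def ExtSort_alt (array : List Int) (N : Int) (M : Int) (p : Int) : Int × Int × Int × List Int :=
  let starts := PySem.List.pyRange 0 N M
  let R : Int := starts.length
  let covered := (PySem.List.pyGet? starts (-1)).getD 0 + M
  let K := pvLoopB R.toNat R p 0
  (R, K, K + 1,
    PySem.List.sorted (PySem.List.slice array none (some covered)) (fun x => x))

-- ===== PRECONDITION & SPEC =====
-- The inputs on which the Python A returns normally and its value is the one claimed: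
-- N ≥ 1 and M ≥ 1 (with N ≤ 0 or M = 0 range raises ValueError or runs is empty and
-- runs[0] raises IndexError), and either p ≥ 2 or there is only one run (N ≤ M): with
-- more than one run, p = 1 loops forever, p = 0 raises ValueError, and p < 0 empties
-- runs so runs[0] raises IndexError. Pre_ also excludes the inputs with BOTH N < 0 and
-- M < 0, where range(0, N, M) is nonempty and A and B each return the sort of some
-- clamped negative-slice prefix of the array: with a negative element count and a
-- negative run size no caller would specify either value, so neither is claimed.
def Pre_ExtSort (array : List Int) (N : Int) (M : Int) (p : Int) : Prop :=
  1 ≤ N ∧ 1 ≤ M ∧ (2 ≤ p ∨ N ≤ M)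
instance (array : List Int) (N : Int) (M : Int) (p : Int) : Decidable (Pre_ExtSort array N M p) := by unfold Pre_ExtSort; infer_instance

def pvWitness_ExtSort : List Int × Int × Int × Int := ([3, 1, 2, 5, 4], 5, 2, 2)

def Spec_ExtSort (array : List Int) (N : Int) (M : Int) (p : Int) (out : Int × Int × Int × List Int) : Prop := out = ExtSort_alt array N M p
instance (array : List Int) (N : Int) (M : Int) (p : Int) (out : Int × Int × Int × List Int) : Decidable (Spec_ExtSort array N M p out) := by unfold Spec_ExtSort; infer_instance

-- ===== CLAIM (what is proved, stated in full; the proofs are below) =====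
def Claim_equal_ExtSort : Prop := ∀ (array : List Int) (N : Int) (M : Int) (p : Int), Dom_ExtSort array N M p → Pre_ExtSort array N M p → Spec_ExtSort array N M p (ExtSort array N M p)

-- ===== LEMMAS AND PROOFS =====

theorem pvMerge_perm (l1 l2 : List Int) : (pvMerge l1 l2).Perm (l1 ++ l2) := by
  fun_induction pvMerge l1 l2 with
  | case1 l2 => simp
  | case2 l1 h => simp
  | case3 a l1 b l2 hab ih => simpa using ih.cons a
  | case4 a l1 b l2 hab ih =>
      refine (ih.cons b).trans ?_
      exact (List.perm_middle.symm).trans (by simp)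

theorem pvMerge_mem {x : Int} {l1 l2 : List Int} (h : x ∈ pvMerge l1 l2) : x ∈ l1 ∨ x ∈ l2 := by
  have := (pvMerge_perm l1 l2).mem_iff.mp h
  simpa using this

theorem pvMerge_pairwise (l1 l2 : List Int)
    (h1 : l1.Pairwise (· ≤ ·)) (h2 : l2.Pairwise (· ≤ ·)) :
    (pvMerge l1 l2).Pairwise (· ≤ ·) := by
  fun_induction pvMerge l1 l2 with
  | case1 l2 => exact h2
  | case2 l1 h => exact h1
  | case3 a l1 b l2 hab ih =>
      rw [List.pairwise_cons] at h1 ⊢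
      refine ⟨?_, ih h1.2 h2⟩
      intro y hy
      rcases pvMerge_mem hy with h | h
      · exact h1.1 y h
      · rcases List.mem_cons.mp h with rfl | h
        · exact le_of_lt hab
        · rw [List.pairwise_cons] at h2
          exact le_of_lt (lt_of_lt_of_le hab (h2.1 y h))
  | case4 a l1 b l2 hab ih =>
      rw [List.pairwise_cons] at h2 ⊢
      refine ⟨?_, ih h1 h2.2⟩
      intro y hy
      rcases pvMerge_mem hy with h | h
      · rcases List.mem_cons.mp h with rfl | h
        · omega
        · rw [List.pairwise_cons] at h1
          exact le_trans (by omega) (h1.1 y h)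
      · exact h2.1 y h

theorem pv_foldl_perm (rest : List (List Int)) (acc : List Int) :
    (rest.foldl pvMerge acc).Perm (acc ++ rest.flatten) := by
  induction rest generalizing acc with
  | nil => simp
  | cons g rest ih =>
      simp only [List.foldl_cons, List.flatten_cons]
      refine (ih (pvMerge acc g)).trans ?_
      have := (pvMerge_perm acc g).append_right rest.flatten
      simpa [List.append_assoc] using this

theorem pvMerge2d_perm (gs : List (List Int)) : (pvMerge2d gs).Perm gs.flatten := by
  cases gs with
  | nil => simp [pvMerge2d]
  | cons r rest => simpa [pvMerge2d] using pv_foldl_perm rest r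

theorem pvMerge2d_pairwise (gs : List (List Int))
    (h : ∀ l ∈ gs, l.Pairwise (· ≤ ·)) : (pvMerge2d gs).Pairwise (· ≤ ·) := by
  cases gs with
  | nil => simp [pvMerge2d]
  | cons r rest =>
      simp only [pvMerge2d]
      have hr := h r (by simp)
      have hrest : ∀ l ∈ rest, l.Pairwise (· ≤ ·) := fun l hl => h l (by simp [hl])
      clear h
      induction rest generalizing r with
      | nil => exact hr
      | cons g rest ih =>
          simp only [List.foldl_cons]
          exact ih (pvMerge r g)
            (pvMerge_pairwise r g hr (hrest g (by simp)))
            (fun l hl => hrest l (by simp [hl]))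

theorem pv_blocks_flatten {α : Type} (xs : List α) (m cnt : Nat) :
    ((List.range cnt).map (fun k => (xs.drop (m * k)).take m)).flatten = xs.take (m * cnt) := by
  induction cnt with
  | zero => simp
  | succ c ih =>
      rw [List.range_succ, List.map_append, List.flatten_append, ih]
      have : m * (c + 1) = m * c + m := by ring
      rw [this, List.take_add]
      simp

theorem pv_ceil_ge (L pn : Nat) (hp : 1 ≤ pn) : L ≤ pn * ((L + pn - 1) / pn) := by
  have h := Nat.div_add_mod (L + pn - 1) pn
  have h2 := Nat.mod_lt (L + pn - 1) (by omega : 0 < pn)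
  omega

theorem pv_ceil_lt (L pn : Nat) (hL : 2 ≤ L) (hp : 2 ≤ pn) : (L + pn - 1) / pn < L := by
  rw [Nat.div_lt_iff_lt_mul (by omega)]
  have h1 : 2 * pn ≤ L * pn := Nat.mul_le_mul_right pn hL
  have h2 : 2 * L ≤ L * pn := by rw [Nat.mul_comm L pn]; exact Nat.mul_le_mul_right L hp
  omega

theorem pv_ceil_floordiv (L pn : Nat) (hp : 1 ≤ pn) :
    PySem.Int.floordiv ((L : Int) + pn - 1) pn = (((L + pn - 1) / pn : Nat) : Int) := by
  have h1 : ((L : Int) + pn - 1) = ((L + pn - 1 : Nat) : Int) := by omega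
  rw [h1, PySem.Int.floordiv_natCast]

theorem pv_pyRange_blocks (L pn : Nat) (hL : 1 ≤ L) (hp : 1 ≤ pn) :
    PySem.List.pyRange 0 (L : Int) (pn : Int) =
      (List.range ((L + pn - 1) / pn)).map (fun k => ((pn * k : Nat) : Int)) := by
  rw [PySem.List.pyRange_of_pos 0 (L : Int) (by exact_mod_cast hp)]
  rw [if_pos (by exact_mod_cast hL : (0:Int) < L)]
  have hcnt : ((((L : Int) - 0 + pn - 1) / pn)).toNat = (L + pn - 1) / pn := by
    have h1 : ((L : Int) - 0 + pn - 1) = ((L + pn - 1 : Nat) : Int) := by omega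
    rw [h1, ← Int.natCast_div, Int.toNat_natCast]
  rw [hcnt]
  refine List.map_congr_left ?_
  intro k _
  push_cast
  ring

theorem pvPass_eq (runs : List (List Int)) (pn : Nat) (hr : 1 ≤ runs.length) (hp : 1 ≤ pn) :
    pvPass runs (pn : Int) =
      (List.range ((runs.length + pn - 1) / pn)).map
        (fun k => pvMerge2d ((runs.drop (pn * k)).take pn)) := by
  unfold pvPass
  rw [pv_pyRange_blocks runs.length pn hr hp, List.map_map]
  refine List.map_congr_left ?_
  intro k _
  simp only [Function.comp]
  congr 1
  have : ((pn * k : Nat) : Int) + (pn : Int) = (((pn * k : Nat) : Int) + ((pn : Nat) : Int)) := by norm_num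
  rw [this, PySem.List.slice_natCast_add]

theorem pv_flatten_perm_map {α : Type} (l : List α) (f g : α → List Int)
    (h : ∀ x ∈ l, (f x).Perm (g x)) : (l.map f).flatten.Perm (l.map g).flatten := by
  apply List.Perm.flatten_congr
  rw [List.forall₂_map_left_iff, List.forall₂_map_right_iff]
  exact List.forall₂_same.mpr h

theorem pvPass_flatten_perm (runs : List (List Int)) (pn : Nat)
    (hr : 1 ≤ runs.length) (hp : 1 ≤ pn) :
    (pvPass runs (pn : Int)).flatten.Perm runs.flatten := by
  rw [pvPass_eq runs pn hr hp]
  refine List.Perm.trans (pv_flatten_perm_map _ _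
      (fun k => ((runs.drop (pn * k)).take pn).flatten) ?_) ?_
  · intro k _
    exact pvMerge2d_perm _
  · have h1 : ((List.range ((runs.length + pn - 1) / pn)).map
        (fun k => ((runs.drop (pn * k)).take pn).flatten)).flatten
        = ((List.range ((runs.length + pn - 1) / pn)).map
            (fun k => (runs.drop (pn * k)).take pn)).flatten.flatten := by
      rw [List.flatten_flatten, List.map_map]
      rfl
    rw [h1, pv_blocks_flatten]
    have h2 : runs.length ≤ pn * ((runs.length + pn - 1) / pn) :=
      pv_ceil_ge runs.length pn hp
    rw [List.take_of_length_le (by omega)]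

theorem pvLoop_eq (fuel : Nat) (runs : List (List Int)) (pn : Nat) (K : Int) (target : List Int)
    (hp : 2 ≤ pn) (hne : runs ≠ []) (hs : ∀ l ∈ runs, l.Pairwise (· ≤ ·))
    (hperm : runs.flatten.Perm target) (hfuel : runs.length ≤ fuel) :
    pvLoopA fuel runs (pn : Int) K =
      (pvLoopB fuel (runs.length : Int) (pn : Int) K,
        PySem.List.sorted target (fun x => x)) := by
  induction fuel generalizing runs K with
  | zero =>
      exfalso
      have : 1 ≤ runs.length := List.length_pos_iff.mpr hne
      omega
  | succ fuel ih =>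
      by_cases h1 : 1 < runs.length
      · have hcast : (1 : Int) < (runs.length : Int) := by exact_mod_cast h1
        rw [pvLoopA, if_pos h1, pvLoopB, if_pos hcast]
        have hpass := pvPass_eq runs pn (by omega) (by omega)
        have hlen : (pvPass runs (pn : Int)).length = (runs.length + pn - 1) / pn := by
          rw [hpass]; simp
        have hge := pv_ceil_ge runs.length pn (by omega)
        have hcnt1 : 1 ≤ (runs.length + pn - 1) / pn := by
          by_contra hc
          have h0 : (runs.length + pn - 1) / pn = 0 := by omega
          rw [h0, Nat.mul_zero] at hge
          omega
        have hne' : pvPass runs (pn : Int) ≠ [] := by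
          intro h
          rw [h] at hlen
          simp at hlen
          omega
        have hs' : ∀ l ∈ pvPass runs (pn : Int), l.Pairwise (· ≤ ·) := by
          rw [hpass]
          intro l hl
          rcases List.mem_map.mp hl with ⟨k, _, rfl⟩
          refine pvMerge2d_pairwise _ ?_
          intro g hg
          exact hs g (List.mem_of_mem_drop (List.mem_of_mem_take hg))
        have hperm' : (pvPass runs (pn : Int)).flatten.Perm target :=
          (pvPass_flatten_perm runs pn (by omega) (by omega)).trans hperm
        have hlt := pv_ceil_lt runs.length pn h1 hp
        have := ih (pvPass runs (pn : Int)) (K + 1) hne' hs' hperm' (by omega)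
        rw [this, hlen]
        congr 2
        rw [pv_ceil_floordiv runs.length pn (by omega)]
      · have hL : runs.length = 1 := by
          have : 1 ≤ runs.length := List.length_pos_iff.mpr hne
          omega
        obtain ⟨r, hr⟩ : ∃ r, runs = [r] := by
          cases runs with
          | nil => simp at hL
          | cons a t =>
              cases t with
              | nil => exact ⟨a, rfl⟩
              | cons b t => simp at hL
        subst hr
        rw [pvLoopA, if_neg h1, pvLoopB]
        rw [if_neg (by simp)]
        simp only [List.headD]
        congr 1
        refine (PySem.List.sorted_id_eq_of_perm_of_pairwise target r ?_ ?_).symm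
        · simpa using hperm
        · exact hs r (by simp)

theorem pvRuns_eq (array : List Int) (Nn Mn : Nat) (hN : 1 ≤ Nn) (hM : 1 ≤ Mn) :
    (PySem.List.pyRange 0 (Nn : Int) (Mn : Int)).map
      (fun i => PySem.List.sorted (PySem.List.slice array (some i) (some (i + (Mn : Int)))) (fun x => x)) =
    (List.range ((Nn + Mn - 1) / Mn)).map
      (fun k => PySem.List.sorted ((array.drop (Mn * k)).take Mn) (fun x => x)) := by
  rw [pv_pyRange_blocks Nn Mn hN hM, List.map_map]
  refine List.map_congr_left ?_
  intro k _
  simp only [Function.comp]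
  congr 1
  have : ((Mn * k : Nat) : Int) + (Mn : Int) = (((Mn * k : Nat) : Int) + ((Mn : Nat) : Int)) := by norm_num
  rw [this, PySem.List.slice_natCast_add]

theorem pvRuns_flatten_perm (array : List Int) (Nn Mn : Nat) :
    ((List.range ((Nn + Mn - 1) / Mn)).map
      (fun k => PySem.List.sorted ((array.drop (Mn * k)).take Mn) (fun x => x))).flatten.Perm
    (array.take (Mn * ((Nn + Mn - 1) / Mn))) := by
  refine List.Perm.trans (pv_flatten_perm_map _ _
      (fun k => (array.drop (Mn * k)).take Mn) ?_) ?_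
  · intro k _
    exact PySem.List.sorted_perm _ _ _
  · rw [pv_blocks_flatten]

theorem ExtSort_eq_alt (array : List Int) (N : Int) (M : Int) (p : Int)
    (h : Pre_ExtSort array N M p) :
    ExtSort array N M p = ExtSort_alt array N M p := by
  obtain ⟨hN, hM, hp⟩ := h
  lift N to ℕ using (by omega) with Nn
  lift M to ℕ using (by omega) with Mn
  have hN' : 1 ≤ Nn := by exact_mod_cast hN
  have hM' : 1 ≤ Mn := by exact_mod_cast hM
  have hcnt1 : 1 ≤ (Nn + Mn - 1) / Mn := by
    rw [Nat.one_le_div_iff (by omega)]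
    omega
  obtain ⟨c', hc'⟩ : ∃ c', (Nn + Mn - 1) / Mn = c' + 1 :=
    ⟨(Nn + Mn - 1) / Mn - 1, by omega⟩
  unfold ExtSort ExtSort_alt
  rw [pvRuns_eq array Nn Mn hN' hM', pv_pyRange_blocks Nn Mn hN' hM', hc']
  have hlast : (PySem.List.pyGet?
      ((List.range (c' + 1)).map (fun k => ((Mn * k : Nat) : Int))) (-1)).getD 0 + (Mn : Int)
      = ((Mn * (c' + 1) : Nat) : Int) := by
    simp [pysem]
    ring
  dsimp only
  rw [hlast]
  simp only [List.length_map, List.length_range, Int.toNat_natCast]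
  have hs : ∀ l ∈ (List.range (c' + 1)).map
      (fun k => PySem.List.sorted ((array.drop (Mn * k)).take Mn) (fun x => x)),
      l.Pairwise (· ≤ ·) := by
    intro l hl
    rcases List.mem_map.mp hl with ⟨k, _, rfl⟩
    exact PySem.List.sorted_pairwise _ _
  have htarget : PySem.List.slice array none (some ((Mn * (c' + 1) : Nat) : Int))
      = array.take (Mn * (c' + 1)) := PySem.List.slice_to_natCast array _
  rcases hp with hp2 | hNM
  · -- p ≥ 2: use the loop correspondence
    lift p to ℕ using (by omega) with pn
    have hpn : 2 ≤ pn := by exact_mod_cast hp2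
    have hlen : ((List.range (c' + 1)).map
        (fun k => PySem.List.sorted ((array.drop (Mn * k)).take Mn) (fun x => x))).length
        = c' + 1 := by simp
    have hne : (List.range (c' + 1)).map
        (fun k => PySem.List.sorted ((array.drop (Mn * k)).take Mn) (fun x => x)) ≠ [] := by
      intro hnil
      rw [hnil] at hlen
      simp at hlen
    have hperm := pvRuns_flatten_perm array Nn Mn
    rw [hc', ← htarget] at hperm
    have hloop := pvLoop_eq (c' + 1) _ pn 0 _ hpn hne hs hperm (le_of_eq hlen)
    rw [hlen] at hloop
    rw [hloop]
  · -- single run: N ≤ M, the loop body never executes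
    have hNM' : Nn ≤ Mn := by exact_mod_cast hNM
    have hc0 : c' = 0 := by
      have h2 : (Nn + Mn - 1) / Mn < 2 := by
        rw [Nat.div_lt_iff_lt_mul (by omega)]
        omega
      omega
    subst hc0
    norm_num [List.range_one, pvLoopA, pvLoopB]

-- ===== VERDICT (by name: the statement is the Claim_ definition above) =====
theorem ExtSort_spec : Claim_equal_ExtSort := by
  intro array N M p _ hpre
  unfold Spec_ExtSort
  exact ExtSort_eq_alt array N M p hpre
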